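-- pv_equiv track=rewrite | github.com/rootifera/benchmarkinator | utils/hardware_loader.py | _strip_block_comments
-- ===== SOURCE A (Python) =====
-- def _strip_block_comments(s: str) -> str:
--     # remove /* ... */ including MySQL /*! ... */
--     out = []
--     i, n = 0, len(s)
--     while i < n:
--         if i + 1 < n and s[i] == "/" and s[i + 1] == "*":
--             i += 2
--             while i + 1 < n and not (s[i] == "*" and s[i + 1] == "/"):
--                 i += 1
--             i += 2 if i + 1 < n else 1
--         else:
--             out.append(s[i])
--             i += 1
--     return "".join(out)
-- ===== SOURCE B (Python) =====
-- def _strip_block_comments(s: str) -> str: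
--     # chunk-wise: jump between comment delimiters with str.find instead of per-char scanning
--     out = []
--     while True:
--         i = s.find("/*")
--         if i == -1:
--             out.append(s)
--             break
--         out.append(s[:i])
--         s = s[i + 2:]
--         j = s.find("*/")
--         if j == -1:
--             break
--         s = s[j + 2:]
--     return "".join(out)
-- ===== Notes on version B (the rewrite author's own statement) =====
-- stated objective: faster
-- what changed: B replaces A's per-character index scan (outer while with an inner char-by-char comment skipper and a char accumulator) by delimiter chunking: repeatedly locate the next comment opener with str.find, emit the whole chunk before it, find the closer (discarding the tail if absent, matching the unterminated-comment behaviour), and join the chunks.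
import Mathlib
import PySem

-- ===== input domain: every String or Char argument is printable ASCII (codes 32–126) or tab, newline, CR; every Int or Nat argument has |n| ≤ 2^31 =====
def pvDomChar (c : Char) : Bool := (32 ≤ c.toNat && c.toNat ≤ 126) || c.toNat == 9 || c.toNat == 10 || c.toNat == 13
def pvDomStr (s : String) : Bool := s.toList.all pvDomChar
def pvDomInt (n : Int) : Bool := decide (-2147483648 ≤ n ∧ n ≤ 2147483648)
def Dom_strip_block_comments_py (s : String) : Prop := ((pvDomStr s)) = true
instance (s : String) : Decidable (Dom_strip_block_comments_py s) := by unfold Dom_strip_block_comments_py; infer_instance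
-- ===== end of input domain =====

-- B chunks between delimiters with find instead of A's per-character scan; same value everywhere.

-- ===== PORT A =====
-- A's outer while (copy chars, detect "/*") and inner while (scan to "*/", with the
-- `i += 2 if i + 1 < n else 1` exit) become the obvious mutual recursion on the suffix at i.
mutual
  def pvGoA : List Char → List Char
    | [] => []                                  -- i = n: outer while ends
    | [c] => [c]                                -- i + 1 < n fails: append s[i], i += 1
    | a :: b :: rest =>
      if a = '/' ∧ b = '*' then pvSkipA rest    -- comment opens: i += 2, inner while
      else a :: pvGoA (b :: rest)               -- append s[i], i += 1
  termination_by l => l.length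
  def pvSkipA : List Char → List Char
    | [] => []                                  -- i + 1 < n fails: i += 1, outer while ends
    | [_] => []                                 -- likewise (the char is consumed)
    | a :: b :: rest =>
      if a = '*' ∧ b = '/' then pvGoA rest      -- closer found: i += 2, back to outer while
      else pvSkipA (b :: rest)                  -- i += 1
  termination_by l => l.length
end

def strip_block_comments_py (s : String) : String := String.mk (pvGoA s.toList)

-- ===== PORT B =====
-- Source B: i = s.find("/*"); if -1 emit s and stop; else emit s[:i], s = s[i+2:],
-- j = s.find("*/"); if -1 stop; else s = s[j+2:] and loop; join the chunks.
def pvGoB (l : List Char) : List Char :=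
  let i := PySem.Chars.find l ['/', '*']
  if hi : i = -1 then l
  else
    let pre := l.take i.toNat
    let rest := l.drop (i.toNat + 2)
    let j := PySem.Chars.find rest ['*', '/']
    if j = -1 then pre
    else pre ++ pvGoB (rest.drop (j.toNat + 2))
termination_by l.length
decreasing_by
  have h2 : 2 ≤ l.length := by
    have := (PySem.Chars.find_ne_neg_one_iff (s := l) (sub := ['/', '*'])).mp hi
    simpa using this.length_le
  simp only [List.length_drop]
  omega

def strip_block_comments_py_alt (s : String) : String := String.mk (pvGoB s.toList)

-- ===== PRECONDITION & SPEC =====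
def Spec_strip_block_comments_py (s : String) (out : String) : Prop := out = strip_block_comments_py_alt s
instance (s : String) (out : String) : Decidable (Spec_strip_block_comments_py s out) := by unfold Spec_strip_block_comments_py; infer_instance

-- ===== CLAIM (what is proved, stated in full; the proofs are below) =====
def Claim_equal_strip_block_comments_py : Prop := ∀ (s : String), Dom_strip_block_comments_py s → Spec_strip_block_comments_py s (strip_block_comments_py s)

-- ===== LEMMAS AND PROOFS =====

-- A's outer scan copies everything when no "/*" occurs
theorem pvGoA_no_open (l : List Char) (h : ¬ ['/', '*'] <:+: l) : pvGoA l = l := by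
  induction l with
  | nil => rw [pvGoA]
  | cons a t ih =>
    match t with
    | [] => rw [pvGoA]
    | b :: r =>
      have hab : ¬ (a = '/' ∧ b = '*') := by
        rintro ⟨rfl, rfl⟩; exact h (List.IsPrefix.isInfix ⟨r, rfl⟩)
      have ht : ¬ ['/', '*'] <:+: b :: r :=
        fun hi => h (hi.trans (List.suffix_cons a (b :: r)).isInfix)
      rw [pvGoA, if_neg hab, ih ht]

-- A's inner scan discards everything when no "*/" occurs
theorem pvSkipA_no_close (l : List Char) (h : ¬ ['*', '/'] <:+: l) : pvSkipA l = [] := by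
  induction l with
  | nil => rw [pvSkipA]
  | cons a t ih =>
    match t with
    | [] => rw [pvSkipA]
    | b :: r =>
      have hab : ¬ (a = '*' ∧ b = '/') := by
        rintro ⟨rfl, rfl⟩; exact h (List.IsPrefix.isInfix ⟨r, rfl⟩)
      have ht : ¬ ['*', '/'] <:+: b :: r :=
        fun hi => h (hi.trans (List.suffix_cons a (b :: r)).isInfix)
      rw [pvSkipA, if_neg hab, ih ht]

-- A's outer scan up to the FIRST "/*" (at position k) keeps the prefix and enters the skipper
theorem pvGoA_open (k : Nat) (l : List Char)
    (hp : ['/', '*'] <+: l.drop k) (hmin : ∀ i < k, ¬ ['/', '*'] <+: l.drop i) :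
    pvGoA l = l.take k ++ pvSkipA (l.drop (k + 2)) := by
  induction k generalizing l with
  | zero =>
    simp only [List.drop_zero] at hp
    obtain ⟨r, rfl⟩ := hp
    simp [pvGoA]
  | succ k ih =>
    have h0 : ¬ ['/', '*'] <+: l := by simpa using hmin 0 (Nat.succ_pos k)
    match l with
    | [] => simp at hp
    | [c] =>
      rw [List.drop_eq_nil_of_le (by simp)] at hp
      simp at hp
    | a :: b :: t =>
      have hab : ¬ (a = '/' ∧ b = '*') := by
        rintro ⟨rfl, rfl⟩; exact h0 ⟨t, rfl⟩
      rw [pvGoA, if_neg hab,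
        ih (b :: t) (by simpa using hp)
          (fun i hi => by simpa using hmin (i + 1) (by omega))]
      rfl

-- A's inner scan up to the FIRST "*/" (at position k) resumes the outer scan after it
theorem pvSkipA_close (k : Nat) (l : List Char)
    (hp : ['*', '/'] <+: l.drop k) (hmin : ∀ i < k, ¬ ['*', '/'] <+: l.drop i) :
    pvSkipA l = pvGoA (l.drop (k + 2)) := by
  induction k generalizing l with
  | zero =>
    simp only [List.drop_zero] at hp
    obtain ⟨r, rfl⟩ := hp
    simp [pvSkipA]
  | succ k ih =>
    have h0 : ¬ ['*', '/'] <+: l := by simpa using hmin 0 (Nat.succ_pos k)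
    match l with
    | [] => simp at hp
    | [c] =>
      rw [List.drop_eq_nil_of_le (by simp)] at hp
      simp at hp
    | a :: b :: t =>
      have hab : ¬ (a = '*' ∧ b = '/') := by
        rintro ⟨rfl, rfl⟩; exact h0 ⟨t, rfl⟩
      rw [pvSkipA, if_neg hab,
        ih (b :: t) (by simpa using hp)
          (fun i hi => by simpa using hmin (i + 1) (by omega))]
      rfl

theorem pvGoA_eq_pvGoB (l : List Char) : pvGoA l = pvGoB l := by
  induction hn : l.length using Nat.strong_induction_on generalizing l with
  | _ n ih =>
  subst hn
  unfold pvGoB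
  by_cases hi : PySem.Chars.find l ['/', '*'] = -1
  · simp only [hi, dif_pos]
    exact pvGoA_no_open l ((PySem.Chars.find_eq_neg_one_iff l ['/', '*']).mp hi)
  · simp only [hi, dif_neg, not_false_iff]
    have hipos : 0 ≤ PySem.Chars.find l ['/', '*'] :=
      (PySem.Chars.find_nonneg_iff l ['/', '*']).mpr
        ((PySem.Chars.find_ne_neg_one_iff l ['/', '*']).mp hi)
    obtain ⟨hpre, hmin⟩ := PySem.Chars.find_spec hipos
    set k := (PySem.Chars.find l ['/', '*']).toNat with hk
    have hA := pvGoA_open k l hpre hmin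
    set rest := l.drop (k + 2) with hrest
    by_cases hj : PySem.Chars.find rest ['*', '/'] = -1
    · simp only [hj, if_pos]
      rw [hA, pvSkipA_no_close rest ((PySem.Chars.find_eq_neg_one_iff rest ['*', '/']).mp hj)]
      simp
    · simp only [hj, if_neg, not_false_iff]
      have hjpos : 0 ≤ PySem.Chars.find rest ['*', '/'] :=
        (PySem.Chars.find_nonneg_iff rest ['*', '/']).mpr
          ((PySem.Chars.find_ne_neg_one_iff rest ['*', '/']).mp hj)
      obtain ⟨hpre2, hmin2⟩ := PySem.Chars.find_spec hjpos
      set m := (PySem.Chars.find rest ['*', '/']).toNat with hm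
      rw [hA, pvSkipA_close m rest hpre2 hmin2]
      congr 1
      have h2 : 2 ≤ l.length := by
        have := (PySem.Chars.find_ne_neg_one_iff l ['/', '*']).mp hi
        simpa using this.length_le
      exact ih ((rest.drop (m + 2)).length)
        (by simp only [hrest, List.length_drop]; omega)
        (rest.drop (m + 2)) rfl

-- ===== VERDICT (by name: the statement is the Claim_ definition above) =====
theorem strip_block_comments_py_spec : Claim_equal_strip_block_comments_py := by
  intro s _
  show strip_block_comments_py s = strip_block_comments_py_alt s
  unfold strip_block_comments_py strip_block_comments_py_alt
  rw [pvGoA_eq_pvGoB]
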